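-- pv_equiv track=rewrite | github.com/Nikitamoz18/Timus_tasks | 1574task/main.py | cyclic_shifts_count_input
-- ===== SOURCE A (Python) =====
-- def cyclic_shifts_count_input(sequence):
--     k = 0
--     min_val = 0
--     min_count = 0
--
--     for c in sequence:
--         if c not in ['(', ')']:
--             raise ValueError("Invalid character in the input sequence")
--
--         if c == '(':
--             k += 1
--         elif c == ')':
--             k -= 1
--
--         if k < min_val:
--             min_count = 1
--             min_val = k
--         elif k == min_val:
--             min_count += 1
--
--     result = min_count if k == 0 else 0
--     return result
-- ===== SOURCE B (Python) =====
-- def cyclic_shifts_count_input(sequence):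
--     bal = []
--     k = 0
--     for c in sequence:
--         if c == '(':
--             k += 1
--         elif c == ')':
--             k -= 1
--         else:
--             raise ValueError("Invalid character in the input sequence")
--         bal.append(k)
--     if not bal:
--         return 0
--     if bal[-1] != 0:
--         return 0
--     m = min(bal)
--     return bal.count(m)
-- ===== Notes on version B (the rewrite author's own statement) =====
-- stated objective: alternative
-- what changed: A maintains a running minimum and its multiplicity inside one stateful loop; B first builds the prefix-balance table, then reduces it with min() and count(), guarding the empty/unbalanced cases separately.
import Mathlib
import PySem

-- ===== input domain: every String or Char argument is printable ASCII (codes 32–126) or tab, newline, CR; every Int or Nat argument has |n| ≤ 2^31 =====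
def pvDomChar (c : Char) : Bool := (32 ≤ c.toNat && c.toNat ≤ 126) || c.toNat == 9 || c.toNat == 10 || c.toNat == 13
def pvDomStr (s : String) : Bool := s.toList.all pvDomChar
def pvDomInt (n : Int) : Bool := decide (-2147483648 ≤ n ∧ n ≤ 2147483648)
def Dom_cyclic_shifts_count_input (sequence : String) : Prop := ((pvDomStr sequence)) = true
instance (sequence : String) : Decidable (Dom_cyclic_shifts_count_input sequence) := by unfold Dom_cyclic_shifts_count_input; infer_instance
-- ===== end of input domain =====

-- B replaces A's single stateful running-min/count loop by a build-the-prefix-balance-table pass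
-- followed by separate min()/count() reductions (alternative decomposition, same asymptotic cost).


-- ===== PORT A =====
-- literal transliteration: one loop body carrying (k, min_val, min_count); the 'raise' branch is
-- excluded by Pre_ (on bracket-only input the two δ-branches below are exactly A's updates)
def pvStepA (s : Int × Int × Int) (c : Char) : Int × Int × Int :=
  let k := if c = '(' then s.1 + 1 else if c = ')' then s.1 - 1 else s.1
  if k < s.2.1 then (k, k, 1)
  else if k = s.2.1 then (k, s.2.1, s.2.2 + 1)
  else (k, s.2.1, s.2.2)

def cyclic_shifts_count_input (sequence : String) : Int :=
  let st := sequence.toList.foldl pvStepA ((0 : Int), (0 : Int), (0 : Int))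
  if st.1 = 0 then st.2.2 else 0

-- ===== PORT B =====
-- transliteration of Source B: build the prefix-balance list, then reduce it.
-- bal[-1] is ported as getLastD (exact: it is only reached when bal is nonempty);
-- min(bal) is PySem.List.min? with the identity key (some, since bal is nonempty).
def pvStepB (p : Int × List Int) (c : Char) : Int × List Int :=
  let k := if c = '(' then p.1 + 1 else p.1 - 1
  (k, p.2 ++ [k])

def cyclic_shifts_count_input_alt (sequence : String) : Int :=
  let bal := (sequence.toList.foldl pvStepB ((0 : Int), ([] : List Int))).2
  if bal.isEmpty then 0
  else if bal.getLastD 0 ≠ 0 then 0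
  else
    let m := (PySem.List.min? bal (fun y => y)).getD 0
    (PySem.List.count bal m : Int)

-- ===== PRECONDITION & SPEC =====
-- Pre_ excludes exactly the inputs containing a non-bracket character, on which both A and B raise ValueError
def Pre_cyclic_shifts_count_input (sequence : String) : Prop :=
  (sequence.toList.all fun c => c == '(' || c == ')') = true
instance (sequence : String) : Decidable (Pre_cyclic_shifts_count_input sequence) := by unfold Pre_cyclic_shifts_count_input; infer_instance
def pvWitness_cyclic_shifts_count_input : String := "()"

def Spec_cyclic_shifts_count_input (sequence : String) (out : Int) : Prop := out = cyclic_shifts_count_input_alt sequence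
instance (sequence : String) (out : Int) : Decidable (Spec_cyclic_shifts_count_input sequence out) := by unfold Spec_cyclic_shifts_count_input; infer_instance

-- ===== CLAIM (what is proved, stated in full; the proofs are below) =====
def Claim_equal_cyclic_shifts_count_input : Prop := ∀ (sequence : String), Dom_cyclic_shifts_count_input sequence → Pre_cyclic_shifts_count_input sequence → Spec_cyclic_shifts_count_input sequence (cyclic_shifts_count_input sequence)

-- ===== LEMMAS AND PROOFS =====

-- the prefix-balance list of a bracket string starting from balance k
def pvBal : List Char → Int → List Int
  | [], _ => []
  | c :: cs, k =>
    let k' := if c = '(' then k + 1 else k - 1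
    k' :: pvBal cs k'

theorem pvFoldB (cs : List Char) : ∀ (k : Int) (acc : List Int),
    cs.foldl pvStepB (k, acc) = ((pvBal cs k).getLastD k, acc ++ pvBal cs k) := by
  induction cs with
  | nil => intro k acc; simp [pvBal]
  | cons c cs ih =>
    intro k acc
    simp only [List.foldl_cons, pvStepB, pvBal, ih, List.getLastD_cons, List.append_assoc,
      List.singleton_append]

theorem pvMinComm (l : List Int) : ∀ a b : Int, l.foldl min (min a b) = min a (l.foldl min b) := by
  induction l with
  | nil => intro a b; rfl
  | cons c l ih =>
    intro a b
    simp only [List.foldl_cons, min_assoc, ih]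

theorem pvFoldlMin_le_init (l : List Int) (a : Int) : l.foldl min a ≤ a := by
  have h := pvMinComm l a a
  simp only [min_self] at h
  rw [h]; exact min_le_left _ _

theorem pvFoldlMin_le_getLastD (l : List Int) : ∀ a : Int, l.foldl min a ≤ l.getLastD a := by
  induction l with
  | nil => intro a; exact le_refl a
  | cons y l ih =>
    intro a
    rw [List.foldl_cons, List.getLastD_cons, pvMinComm]
    exact le_trans (min_le_right _ _) (ih y)

-- closed form of A's fold on bracket-only input
theorem pvFoldA (cs : List Char) (hcs : ∀ c ∈ cs, c = '(' ∨ c = ')') :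
    ∀ (k mv mc : Int),
    cs.foldl pvStepA (k, mv, mc)
    = ((pvBal cs k).getLastD k,
       (pvBal cs k).foldl min mv,
       (if (pvBal cs k).foldl min mv < mv then 0 else mc)
         + (((pvBal cs k).count ((pvBal cs k).foldl min mv)) : Int)) := by
  induction cs with
  | nil => intro k mv mc; simp [pvBal]
  | cons c cs ih =>
    intro k mv mc
    have hc : c = '(' ∨ c = ')' := hcs c (List.mem_cons_self)
    have ih := ih (fun c h => hcs c (List.mem_cons_of_mem _ h))
    set k' : Int := if c = '(' then k + 1 else k - 1 with hk'
    have hδ : (if c = '(' then k + 1 else if c = ')' then k - 1 else k) = k' := by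
      rcases hc with h | h <;> simp [h, hk']
    have hstep : pvStepA (k, mv, mc) c
        = if k' < mv then (k', k', 1) else if k' = mv then (k', mv, mc + 1) else (k', mv, mc) := by
      simp only [pvStepA, hδ]
    have hbal : pvBal (c :: cs) k = k' :: pvBal cs k' := by simp [pvBal, hk']
    have hM : ∀ m0 : Int, (pvBal cs k').foldl min m0 ≤ m0 := fun m0 => pvFoldlMin_le_init _ _
    have hcount : ∀ M : Int, ((k' :: pvBal cs k').count M : Int)
        = (if k' = M then 1 else 0) + ((pvBal cs k').count M : Int) := by
      intro M
      rw [List.count_cons]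
      by_cases h : k' = M <;> simp [h] <;> omega
    clear_value k'
    rw [List.foldl_cons, hstep, hbal, List.getLastD_cons, List.foldl_cons]
    by_cases h1 : k' < mv
    · rw [if_pos h1, ih k' k' 1]
      have hmin : min mv k' = k' := by omega
      rw [hmin]
      simp only [Prod.mk.injEq, true_and]
      rw [hcount]
      have hle := hM k'
      by_cases hlt : (pvBal cs k').foldl min k' < k'
      · rw [if_pos hlt, if_pos (by omega), if_neg (by omega)]
        omega
      · have heq : (pvBal cs k').foldl min k' = k' := by omega
        rw [if_neg hlt, if_pos (by omega), if_pos (by omega)]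
        omega
    · rw [if_neg h1]
      have hmin : min mv k' = mv := by omega
      by_cases h2 : k' = mv
      · rw [if_pos h2, ih k' mv (mc + 1), hmin]
        simp only [Prod.mk.injEq, true_and]
        rw [hcount]
        have hle := hM mv
        by_cases hlt : (pvBal cs k').foldl min mv < mv
        · rw [if_pos hlt, if_pos hlt, if_neg (by omega)]
          omega
        · rw [if_neg hlt, if_neg hlt, if_pos (by omega)]
          omega
      · rw [if_neg h2, ih k' mv mc, hmin]
        simp only [Prod.mk.injEq, true_and]
        rw [hcount]
        have hle := hM mv
        rw [if_neg (show ¬ k' = (pvBal cs k').foldl min mv by omega)]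
        omega

-- ===== VERDICT (by name: the statement is the Claim_ definition above) =====
theorem cyclic_shifts_count_input_spec : Claim_equal_cyclic_shifts_count_input := by
  intro seq _ hpre
  have hpre' : ∀ c ∈ seq.toList, c = '(' ∨ c = ')' := by
    intro c hc
    have := List.all_eq_true.mp hpre c hc
    simpa using this
  unfold Spec_cyclic_shifts_count_input cyclic_shifts_count_input cyclic_shifts_count_input_alt
  simp only [pvFoldA seq.toList hpre' 0 0 0, pvFoldB seq.toList 0 [], List.nil_append]
  cases hbal : pvBal seq.toList 0 with
  | nil => simp
  | cons x xs =>
    simp only [List.isEmpty_cons, Bool.false_eq_true, if_false, ite_not]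
    by_cases hlast : (x :: xs).getLastD 0 = 0
    · simp only [hlast, PySem.List.min?_id_cons, Option.getD_some, PySem.List.count_eq]
      have hle : xs.foldl min x ≤ 0 := by
        have := pvFoldlMin_le_getLastD xs x
        rw [List.getLastD_cons] at hlast
        omega
      have hmin : (x :: xs).foldl min 0 = xs.foldl min x := by
        rw [List.foldl_cons, pvMinComm]
        omega
      simp only [hmin]
      split_ifs <;> omega
    · rw [if_neg hlast, if_neg (by rw [List.getLastD_cons] at hlast ⊢; exact hlast)]
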